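-- pv_equiv track=rewrite | github.com/tjacek/neural_ensemble | tree_exp.py | from_desc
-- ===== SOURCE A (Python) =====
-- def from_desc(desc,proto):
--     variants=[proto.copy()]
--     keys=[ key_j
--             for key_j in desc
--                 if(not key_j=="type")]
--     for key_i in keys:
--         new_variants=[]
--         for arg_j in desc[key_i]:
--             for var_k in variants:
--                 var_ijk=var_k.copy()
--                 var_ijk[key_i]=arg_j
--                 new_variants.append(var_ijk)
--         variants=new_variants
--     return variants
-- ===== SOURCE B (Python) =====
-- from itertools import product
--
-- def from_desc(desc, proto):
--     keys = [k for k in desc if k != "type"]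
--     # product varies its LAST factor fastest; A varies the FIRST key fastest,
--     # so feed product the value-lists in reversed key order.
--     out = []
--     for combo in product(*[desc[k] for k in reversed(keys)]):
--         v = proto.copy()
--         for k, val in zip(keys, reversed(combo)):
--             v[k] = val
--         out.append(v)
--     return out
-- ===== Notes on version B (the rewrite author's own statement) =====
-- stated objective: idiomatic
-- what changed: Replaces A's level-by-level rebuilding of the variants list (copying every partial variant at each key) with a single itertools.product enumeration over the reversed value-lists, assembling each finished variant once from proto.
import Mathlib
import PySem

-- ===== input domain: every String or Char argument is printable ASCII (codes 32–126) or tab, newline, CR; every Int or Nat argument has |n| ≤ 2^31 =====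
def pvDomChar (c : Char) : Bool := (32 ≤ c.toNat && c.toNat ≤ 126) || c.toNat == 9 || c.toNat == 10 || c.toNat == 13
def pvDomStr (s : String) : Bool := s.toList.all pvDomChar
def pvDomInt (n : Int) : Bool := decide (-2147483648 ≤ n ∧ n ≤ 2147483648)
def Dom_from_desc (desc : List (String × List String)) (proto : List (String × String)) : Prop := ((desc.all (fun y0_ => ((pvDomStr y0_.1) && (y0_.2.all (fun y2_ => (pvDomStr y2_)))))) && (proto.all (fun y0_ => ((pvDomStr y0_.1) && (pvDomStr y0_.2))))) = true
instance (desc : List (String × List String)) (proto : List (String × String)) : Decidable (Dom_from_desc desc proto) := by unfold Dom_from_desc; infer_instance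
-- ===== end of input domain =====

-- B enumerates itertools.product over the reversed value-lists instead of A's
-- level-by-level copying; same values in the same order (idiomatic rewrite).

-- shared Python-dict primitives: `d[k] = v` on a variant and `desc[k]` lookup
def pvIns (v : List (String × String)) (k a : String) : List (String × String) :=
  (PySem.Dict.insert (PySem.Dict.mk v) k a).items

def pvVals (desc : List (String × List String)) (k : String) : List String :=
  (PySem.Dict.mk desc).getD k []

-- ===== PORT A =====
def from_desc (desc : List (String × List String)) (proto : List (String × String)) : List (List (String × String)) :=
  let variants := [proto]
  let keys := ((PySem.Dict.mk desc).keys).filter (fun key_j => !(key_j == "type"))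
  keys.foldl (fun variants key_i =>
    (pvVals desc key_i).foldl (fun new_variants arg_j =>
      variants.foldl (fun nv var_k => nv ++ [pvIns var_k key_i arg_j]) new_variants) []) variants

-- ===== PORT B =====
-- itertools.product over a list of value-lists (last factor varies fastest)
def pyProduct : List (List String) → List (List String)
  | [] => [[]]
  | l :: ls => l.flatMap (fun x => (pyProduct ls).map (fun rest => x :: rest))

def from_desc_alt (desc : List (String × List String)) (proto : List (String × String)) : List (List (String × String)) :=
  let keys := ((PySem.Dict.mk desc).keys).filter (fun k => !(k == "type"))
  (pyProduct (keys.reverse.map (pvVals desc))).map (fun combo =>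
    (keys.zip combo.reverse).foldl (fun v kv => pvIns v kv.1 kv.2) proto)

-- ===== PRECONDITION & SPEC =====
def Spec_from_desc (desc : List (String × List String)) (proto : List (String × String)) (out : List (List (String × String))) : Prop := out = from_desc_alt desc proto
instance (desc : List (String × List String)) (proto : List (String × String)) (out : List (List (String × String))) : Decidable (Spec_from_desc desc proto out) := by unfold Spec_from_desc; infer_instance

-- ===== CLAIM (what is proved, stated in full; the proofs are below) =====
def Claim_equal_from_desc : Prop := ∀ (desc : List (String × List String)) (proto : List (String × String)), Dom_from_desc desc proto → Spec_from_desc desc proto (from_desc desc proto)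

-- ===== LEMMAS AND PROOFS =====

theorem pyProduct_length {ls : List (List String)} {c : List String}
    (h : c ∈ pyProduct ls) : c.length = ls.length := by
  induction ls generalizing c with
  | nil => simp [pyProduct] at h; simp [h]
  | cons l ls ih =>
    simp [pyProduct, List.mem_flatMap] at h
    obtain ⟨x, _, c', hc', rfl⟩ := h
    simp [ih hc']

-- A's one-key step collapses to a flatMap over values of a map over variants
theorem stepA_eq (vals : List String) (k : String) (V : List (List (String × String))) :
    vals.foldl (fun new_variants arg_j =>
      V.foldl (fun nv var_k => nv ++ [pvIns var_k k arg_j]) new_variants) []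
      = vals.flatMap (fun a => V.map (fun v => pvIns v k a)) := by
  calc vals.foldl (fun nv a => V.foldl (fun nv var_k => nv ++ [pvIns var_k k a]) nv) []
      = vals.foldl (fun nv a => nv ++ V.map (fun v => pvIns v k a)) [] := by
        apply PySem.List.foldl_congr_mem; intro acc a _
        rw [PySem.List.foldl_append_singleton_eq_map]
    _ = vals.flatMap (fun a => V.map (fun v => pvIns v k a)) := by
        rw [PySem.List.foldl_append_eq_flatMap]; simp

-- main invariant: A's fold over any key list equals B's product enumeration
theorem fold_eq_product (vals : String → List String)
    (keys : List String) (variants : List (List (String × String))) :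
    keys.foldl (fun variants key_i =>
      (vals key_i).foldl (fun new_variants arg_j =>
        variants.foldl (fun nv var_k => nv ++ [pvIns var_k key_i arg_j]) new_variants) []) variants
    = (pyProduct (keys.reverse.map vals)).flatMap (fun combo =>
        variants.map (fun v => (keys.zip combo.reverse).foldl (fun v kv => pvIns v kv.1 kv.2) v)) := by
  induction keys using List.reverseRecOn with
  | nil => simp [pyProduct]
  | append_singleton ks k ih =>
    rw [List.foldl_append]
    simp only [List.foldl_cons, List.foldl_nil]
    rw [stepA_eq, ih]
    simp only [List.reverse_append, List.reverse_cons, List.reverse_nil, List.nil_append,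
      List.singleton_append, List.map_cons, pyProduct]
    simp only [List.map_flatMap, List.flatMap_map, List.flatMap_assoc, List.map_map]
    apply List.flatMap_congr; intro a _
    apply List.flatMap_congr; intro c hc
    apply List.map_congr_left; intro v _
    have hlen : c.reverse.length = ks.length := by
      have := pyProduct_length hc; simp at this; simp [this]
    rw [List.reverse_cons, List.zip_append (by simp [hlen]), List.foldl_append]
    simp

theorem from_desc_spec : Claim_equal_from_desc := by
  intro desc proto _
  unfold Spec_from_desc from_desc from_desc_alt
  rw [fold_eq_product]
  simp only [List.map_cons, List.map_nil]
  exact List.flatMap_pure_eq_map _ _
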